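-- pv_equiv track=rewrite | github.com/Developing-Studio/ci-DiscordChess | Chess/chess.py | dashes_to_numbers
-- ===== SOURCE A (Python) =====
-- def dashes_to_numbers(fen_line: str) -> str:
--     output = ""
--     number = 0
--     for item in fen_line:
--         if item == "-":
--             number += 1
--         else:
--             if number == 0:
--                 output += item
--             else:
--                 output += str(number)
--                 output += item
--                 number = 0
--     if number != 0:
--         output += str(number)
--     return output
-- ===== SOURCE B (Python) =====
-- def dashes_to_numbers(fen_line: str) -> str:
--     parts = []
--     i, n = 0, len(fen_line)
--     while i < n:
--         ch = fen_line[i]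
--         j = i
--         while j < n and fen_line[j] == ch:
--             j += 1
--         parts.append(str(j - i) if ch == "-" else fen_line[i:j])
--         i = j
--     return "".join(parts)
-- ===== Notes on version B (the rewrite author's own statement) =====
-- stated objective: alternative
-- what changed: B scans maximal runs of equal characters (inner while finds each run's end) and emits str(len) for dash runs or the run slice otherwise, instead of A's char-by-char loop with a pending-dash counter and final flush.
import Mathlib
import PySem

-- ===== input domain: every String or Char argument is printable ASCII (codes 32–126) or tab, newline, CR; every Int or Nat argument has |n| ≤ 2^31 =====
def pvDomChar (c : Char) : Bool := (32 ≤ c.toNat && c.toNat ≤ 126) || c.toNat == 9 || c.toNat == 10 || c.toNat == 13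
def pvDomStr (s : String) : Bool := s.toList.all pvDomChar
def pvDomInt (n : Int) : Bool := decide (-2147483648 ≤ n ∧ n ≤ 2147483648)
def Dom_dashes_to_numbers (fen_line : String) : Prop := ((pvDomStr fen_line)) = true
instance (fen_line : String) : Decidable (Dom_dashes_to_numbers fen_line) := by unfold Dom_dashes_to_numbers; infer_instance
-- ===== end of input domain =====

-- B replaces A's char-by-char loop with a pending-dash counter by a run-at-a-time scan
-- (objective: alternative decomposition, same O(n) cost).

-- ===== PORT A =====
-- one iteration of A's for-loop: state = (output so far as chars, pending dash count)
def dtnStep (st : List Char × Int) (item : Char) : List Char × Int :=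
  if item == '-' then (st.1, st.2 + 1)
  else if st.2 == 0 then (st.1 ++ [item], st.2)
  else (st.1 ++ (PySem.Int.toStr st.2).toList ++ [item], 0)

def dashes_to_numbers (fen_line : String) : String :=
  let st := fen_line.toList.foldl dtnStep ([], 0)
  if st.2 != 0 then String.ofList (st.1 ++ (PySem.Int.toStr st.2).toList)
  else String.ofList st.1

-- ===== PORT B =====
-- Source B's outer while: take the maximal run of the leading char, emit it (or its length
-- for '-'), recurse on the rest (the inner 'while j < n and fen_line[j] == ch' =
-- takeWhile/dropWhile split at the run boundary).
def dtnGo : List Char → List Char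
  | [] => []
  | c :: cs =>
    let run := List.takeWhile (· == c) (c :: cs)
    let rest := List.dropWhile (· == c) (c :: cs)
    (if c == '-' then (PySem.Int.toStr (Int.ofNat run.length)).toList else run) ++ dtnGo rest
termination_by l => l.length
decreasing_by
  simp only [List.dropWhile]
  simp only [beq_self_eq_true]
  exact Nat.lt_succ_of_le (List.length_dropWhile_le _ _)

def dashes_to_numbers_alt (fen_line : String) : String :=
  String.ofList (dtnGo fen_line.toList)

-- ===== PRECONDITION & SPEC =====
def Spec_dashes_to_numbers (fen_line : String) (out : String) : Prop := out = dashes_to_numbers_alt fen_line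
instance (fen_line : String) (out : String) : Decidable (Spec_dashes_to_numbers fen_line out) := by unfold Spec_dashes_to_numbers; infer_instance

-- ===== CLAIM (what is proved, stated in full; the proofs are below) =====
def Claim_equal_dashes_to_numbers : Prop := ∀ (fen_line : String), Dom_dashes_to_numbers fen_line → Spec_dashes_to_numbers fen_line (dashes_to_numbers fen_line)

-- ===== LEMMAS AND PROOFS =====

-- A's final flush, as a function of the loop state
def dtnFin (st : List Char × Int) : List Char :=
  if st.2 != 0 then st.1 ++ (PySem.Int.toStr st.2).toList else st.1

lemma dtnStep_dash (st : List Char × Int) : dtnStep st '-' = (st.1, st.2 + 1) := by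
  simp [dtnStep]

lemma dtnStep_copy {c : Char} (hc : (c == '-') = false) (out : List Char) :
    dtnStep (out, 0) c = (out ++ [c], 0) := by
  simp [dtnStep, hc]

lemma dtnStep_flush {c : Char} (hc : (c == '-') = false) {n : Int} (hn : n ≠ 0)
    (out : List Char) :
    dtnStep (out, n) c = (out ++ (PySem.Int.toStr n).toList ++ [c], 0) := by
  simp [dtnStep, hc, hn]

-- the output accumulator only ever grows at the end: shift it out of the fold
lemma dtn_shift (l : List Char) (out : List Char) (n : Int) :
    l.foldl dtnStep (out, n) =
      (out ++ (l.foldl dtnStep ([], n)).1, (l.foldl dtnStep ([], n)).2) := by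
  induction l generalizing out n with
  | nil => simp
  | cons c cs ih =>
    simp only [List.foldl_cons]
    by_cases hc : (c == '-') = true
    · have hc' : c = '-' := eq_of_beq hc
      subst hc'
      rw [dtnStep_dash, dtnStep_dash, ih]
    · have hc' : (c == '-') = false := by simpa using hc
      by_cases hn : n = 0
      · subst hn
        rw [dtnStep_copy hc', dtnStep_copy hc']
        simp only [List.nil_append]
        rw [ih (out ++ [c]) 0, ih [c] 0]
        simp
      · rw [dtnStep_flush hc' hn, dtnStep_flush hc' hn]
        simp only [List.nil_append]
        rw [ih (out ++ (PySem.Int.toStr n).toList ++ [c]) 0,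
            ih ((PySem.Int.toStr n).toList ++ [c]) 0]
        simp

lemma dtnFin_shift (out : List Char) (st : List Char × Int) :
    dtnFin (out ++ st.1, st.2) = out ++ dtnFin st := by
  unfold dtnFin; split_ifs <;> simp

-- a run of dashes just bumps the counter
lemma dtn_dash_run (k : Nat) (out : List Char) (n : Int) :
    (List.replicate k '-').foldl dtnStep (out, n) = (out, n + k) := by
  induction k generalizing n with
  | zero => simp
  | succ m ih =>
    rw [List.replicate_succ, List.foldl_cons, dtnStep_dash, ih]
    congr 1
    push_cast; ring

-- a run of non-dashes with no pending count is copied verbatim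
lemma dtn_plain_run (c : Char) (hc : (c == '-') = false) (k : Nat) (out : List Char) :
    (List.replicate k c).foldl dtnStep (out, 0) = (out ++ List.replicate k c, 0) := by
  induction k generalizing out with
  | zero => simp
  | succ m ih =>
    rw [List.replicate_succ, List.foldl_cons, dtnStep_copy hc, ih]
    simp

-- a maximal takeWhile (== c) run is literally `replicate` of its length
lemma dtn_takeWhile_replicate (c : Char) (l : List Char) :
    List.takeWhile (· == c) l = List.replicate (List.takeWhile (· == c) l).length c := by
  rw [List.eq_replicate_iff]
  refine ⟨rfl, fun b hb => ?_⟩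
  have h := List.mem_takeWhile_imp hb
  simpa using h

-- flushing a pending count k ≠ 0 before a list that does not start with '-'
lemma dtn_flush (k : Int) (hk : k ≠ 0) (d : List Char)
    (hd : d = [] ∨ ∃ e r, d = e :: r ∧ (e == '-') = false) :
    dtnFin (d.foldl dtnStep ([], k)) =
      (PySem.Int.toStr k).toList ++ dtnFin (d.foldl dtnStep ([], 0)) := by
  rcases hd with h | ⟨e, r, rfl, he⟩
  · subst h
    simp [dtnFin, hk]
  · simp only [List.foldl_cons]
    rw [dtnStep_flush he hk, dtnStep_copy he]
    simp only [List.nil_append]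
    rw [dtn_shift r ((PySem.Int.toStr k).toList ++ [e]) 0, dtn_shift r [e] 0,
        dtnFin_shift, dtnFin_shift]
    simp

-- main invariant: A's loop+flush equals B's run recursion, on char lists
lemma dtn_main (l : List Char) : dtnFin (l.foldl dtnStep ([], 0)) = dtnGo l := by
  induction l using dtnGo.induct with
  | case1 => simp [dtnGo, dtnFin]
  | case2 c cs rest ih =>
    have IH : dtnFin (List.foldl dtnStep ([], 0) (List.dropWhile (· == c) (c :: cs)))
        = dtnGo (List.dropWhile (· == c) (c :: cs)) := ih
    have hsplit : List.takeWhile (· == c) (c :: cs) ++ List.dropWhile (· == c) (c :: cs)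
        = c :: cs := List.takeWhile_append_dropWhile
    have hrun := dtn_takeWhile_replicate c (c :: cs)
    have hlen : (List.takeWhile (· == c) (c :: cs)).length ≠ 0 := by
      simp [List.takeWhile]
    have hrest : List.dropWhile (· == c) (c :: cs) = [] ∨
        ∃ e r, List.dropWhile (· == c) (c :: cs) = e :: r ∧ (e == c) = false := by
      cases h : List.dropWhile (· == c) (c :: cs) with
      | nil => exact Or.inl rfl
      | cons e r =>
        refine Or.inr ⟨e, r, rfl, ?_⟩
        have := List.head_dropWhile_not (· == c) (l := c :: cs) (by simp [h])
        simpa [h] using this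
    conv_lhs => rw [← hsplit, List.foldl_append]
    by_cases hc : (c == '-') = true
    · have hc' : c = '-' := eq_of_beq hc
      subst hc'
      conv_lhs => rw [hrun]
      rw [dtn_dash_run]
      have hk : ((0 : Int) + ((List.takeWhile (· == '-') ('-' :: cs)).length : Int)) ≠ 0 := by
        simp only [zero_add, ne_eq, Int.natCast_eq_zero]
        exact hlen
      rw [dtn_flush _ hk _ hrest, IH]
      simp only [dtnGo]
      simp [Int.ofNat_eq_natCast]
    · have hc' : (c == '-') = false := by simpa using hc
      conv_lhs => rw [hrun]
      rw [dtn_plain_run c hc']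
      simp only [List.nil_append]
      rw [dtn_shift, dtnFin_shift, IH]
      simp only [dtnGo]
      simp [hc', List.replicate_succ, ← dtn_takeWhile_replicate c cs]

-- ===== VERDICT (by name: the statement is the Claim_ definition above) =====
theorem dashes_to_numbers_spec : Claim_equal_dashes_to_numbers := by
  intro s _
  show dashes_to_numbers s = dashes_to_numbers_alt s
  show (if (((s.toList.foldl dtnStep ([], 0)).2) != 0) = true
        then String.ofList ((s.toList.foldl dtnStep ([], 0)).1
              ++ (PySem.Int.toStr (s.toList.foldl dtnStep ([], 0)).2).toList)
        else String.ofList (s.toList.foldl dtnStep ([], 0)).1)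
      = String.ofList (dtnGo s.toList)
  rw [← dtn_main]
  unfold dtnFin
  split_ifs <;> rfl
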